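-- pv_equiv track=rewrite | github.com/samuelbagin1/sem1-python | cvicSkuska.py | notRepeating
-- ===== SOURCE A (Python) =====
-- def notRepeating(t):
--     pocNeopak=0
--     for retazec in t:
--         doNotCount=False
--         for znak in retazec:
--             pocZnakov=0
--             for znak1 in retazec:
--                 if znak==znak1:
--                     pocZnakov+=1
--                 if pocZnakov==2:
--                     doNotCount=True
--         if doNotCount==False:
--             pocNeopak+=1
--     return pocNeopak
-- ===== SOURCE B (Python) =====
-- def notRepeating(t):
--     # Alternative: sort each string, then one adjacent-pair scan decides distinctness.
--     pocNeopak = 0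
--     for retazec in t:
--         w = sorted(retazec)
--         if all(a != b for a, b in zip(w, w[1:])):
--             pocNeopak += 1
--     return pocNeopak
-- ===== Notes on version B (the rewrite author's own statement) =====
-- stated objective: alternative
-- what changed: Replaced the nested occurrence-counting scans per string with a sort-then-single-adjacent-pass distinctness check.
import Mathlib
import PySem

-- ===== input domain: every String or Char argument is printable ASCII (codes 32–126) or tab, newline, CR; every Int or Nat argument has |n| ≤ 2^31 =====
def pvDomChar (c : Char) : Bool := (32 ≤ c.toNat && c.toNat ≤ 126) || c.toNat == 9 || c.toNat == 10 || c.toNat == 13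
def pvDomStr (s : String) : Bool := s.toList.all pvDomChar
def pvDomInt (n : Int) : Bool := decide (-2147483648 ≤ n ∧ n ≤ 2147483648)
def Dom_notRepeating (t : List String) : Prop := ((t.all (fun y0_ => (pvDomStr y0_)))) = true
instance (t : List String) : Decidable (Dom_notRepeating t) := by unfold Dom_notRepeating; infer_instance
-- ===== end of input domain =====

-- B decides per-string distinctness by sorting and one adjacent-pair scan instead of A's nested occurrence-counting scans (alternative algorithm).

-- ===== PORT A =====
def notRepeating (t : List String) : Int :=
  t.foldl (fun pocNeopak retazec =>
    let doNotCount :=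
      retazec.toList.foldl (fun doNotCount znak =>
        (retazec.toList.foldl (fun (st : Int × Bool) znak1 =>
          let st1 := if znak == znak1 then (st.1 + 1, st.2) else st
          if st1.1 == 2 then (st1.1, true) else st1) ((0 : Int), doNotCount)).2) false
    if doNotCount == false then pocNeopak + 1 else pocNeopak) 0

-- ===== PORT B =====
def notRepeating_alt (t : List String) : Int :=
  t.foldl (fun pocNeopak retazec =>
    let w := PySem.List.sorted retazec.toList (fun c => c) false
    if (w.zip (PySem.List.slice w (some 1) none)).all (fun p => p.1 != p.2) then
      pocNeopak + 1
    else pocNeopak) 0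

-- ===== PRECONDITION & SPEC =====
def Spec_notRepeating (t : List String) (out : Int) : Prop := out = notRepeating_alt t
instance (t : List String) (out : Int) : Decidable (Spec_notRepeating t out) := by unfold Spec_notRepeating; infer_instance

-- ===== CLAIM (what is proved, stated in full; the proofs are below) =====
def Claim_equal_notRepeating : Prop := ∀ (t : List String), Dom_notRepeating t → Spec_notRepeating t (notRepeating t)

-- ===== LEMMAS AND PROOFS =====

-- A's innermost loop body, named for the proofs (definitionally the lambda in the port).
def pvStep (znak : Char) (st : Int × Bool) (znak1 : Char) : Int × Bool :=
  let st1 := if znak == znak1 then (st.1 + 1, st.2) else st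
  if st1.1 == 2 then (st1.1, true) else st1

theorem pvStep_snd_true (znak c : Char) (k : Int) : (pvStep znak (k, true) c).2 = true := by
  simp only [pvStep]; split_ifs <;> rfl

theorem pvStep_match (znak c : Char) (h : znak = c) (k : Int) (b : Bool) :
    pvStep znak (k, b) c = if k + 1 = 2 then (k + 1, true) else (k + 1, b) := by
  simp [pvStep, h]

theorem pvStep_nomatch (znak c : Char) (h : ¬ znak = c) (k : Int) (b : Bool) :
    pvStep znak (k, b) c = if k = 2 then (k, true) else (k, b) := by
  simp [pvStep, h]

-- The innermost loop's flag is sticky: once True it stays True.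
theorem pv_inner_sticky (znak : Char) (l : List Char) (k : Int) :
    (l.foldl (pvStep znak) (k, true)).2 = true := by
  induction l generalizing k with
  | nil => rfl
  | cons c l ih =>
      simp only [List.foldl_cons]
      rcases he : pvStep znak (k, true) c with ⟨k', b'⟩
      have hb : b' = true := by
        have h2 := pvStep_snd_true znak c k
        rw [he] at h2; exact h2
      subst hb
      exact ih k'

-- Starting from count k ≤ 1 and flag False, the flag ends True iff znak occurs ≥ 2 - k times.
theorem pv_inner_count (znak : Char) (l : List Char) (k : Int) (h0 : 0 ≤ k) (h1 : k ≤ 1) :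
    (l.foldl (pvStep znak) (k, false)).2 = decide (2 ≤ k + (l.count znak : Int)) := by
  induction l generalizing k with
  | nil => simp; omega
  | cons c l ih =>
      simp only [List.foldl_cons]
      by_cases h : znak = c
      · subst h
        have hc : (znak :: l).count znak = l.count znak + 1 := List.count_cons_self ..
        rw [pvStep_match znak znak rfl k false]
        by_cases hk : k = 1
        · subst hk
          norm_num
          rw [pv_inner_sticky]
          simp
          omega
        · have hk0 : k = 0 := by omega
          subst hk0
          norm_num
          rw [ih 1 (by omega) (by omega)]
          simp
          omega
      · have hc : (c :: l).count znak = l.count znak := by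
          rw [List.count_cons_of_ne (by exact fun e => h e.symm)]
        rw [pvStep_nomatch znak c h k false, if_neg (by omega), hc]
        exact ih k h0 h1

-- The middle loop computes: some character of m occurs at least twice in l.
theorem pv_middle (l m : List Char) (b : Bool) :
    (m.foldl (fun doNotCount znak => (l.foldl (pvStep znak) (0, doNotCount)).2) b)
    = (b || decide (∃ z ∈ m, 2 ≤ l.count z)) := by
  induction m generalizing b with
  | nil => simp
  | cons z m ih =>
      simp only [List.foldl_cons]
      cases b with
      | true => rw [pv_inner_sticky, ih]; simp
      | false =>
          rw [pv_inner_count z l 0 (by omega) (by omega), ih]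
          by_cases h : 2 ≤ l.count z <;> simp [h]

-- A's per-string flag decides non-distinctness.
theorem pv_flagA (l : List Char) :
    (l.foldl (fun doNotCount znak => (l.foldl (pvStep znak) (0, doNotCount)).2) false)
    = decide (¬ l.Nodup) := by
  rw [pv_middle]
  simp only [Bool.false_or, decide_eq_decide]
  rw [List.nodup_iff_count_le_one]
  constructor
  · rintro ⟨z, _, hz⟩ hall; exact absurd (hall z) (by omega)
  · intro h
    push Not at h
    obtain ⟨z, hz⟩ := h
    exact ⟨z, List.count_pos_iff.mp (by omega), by omega⟩

-- On a ≤-sorted list, the adjacent-pair scan decides Nodup.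
theorem pv_adj (w : List Char) (hw : w.Pairwise (· ≤ ·)) :
    ((w.zip w.tail).all (fun p => p.1 != p.2)) = decide w.Nodup := by
  induction w with
  | nil => simp
  | cons a w ih =>
      cases w with
      | nil => simp
      | cons b w =>
          have hab : a ≤ b := (List.pairwise_cons.mp hw).1 b (by simp)
          have hbw : ∀ x ∈ w, b ≤ x := fun x hx =>
            (List.pairwise_cons.mp (List.pairwise_cons.mp hw).2).1 x hx
          have htail : (b :: w).Pairwise (· ≤ ·) := (List.pairwise_cons.mp hw).2
          have ih' := ih htail
          simp only [List.tail_cons, List.zip_cons_cons, List.all_cons] at *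
          rw [ih']
          by_cases hne : a = b
          · subst hne; simp
          · have hlt : a < b := lt_of_le_of_ne hab hne
            have hna : a ∉ b :: w := by
              intro hmem
              rcases List.mem_cons.mp hmem with h | h
              · exact hne h
              · exact absurd (lt_of_lt_of_le hlt (hbw a h)) (lt_irrefl a)
            simp [List.nodup_cons, hna, hne]

-- B's per-string condition also decides Nodup of the original characters.
theorem pv_condB (l : List Char) :
    (((PySem.List.sorted l (fun c => c) false).zip
       (PySem.List.slice (PySem.List.sorted l (fun c => c) false) (some 1) none)).all
      (fun p => p.1 != p.2)) = decide l.Nodup := by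
  rw [PySem.List.slice_from_one]
  rw [pv_adj _ (by simpa using PySem.List.sorted_pairwise l (fun c => c))]
  simp only [decide_eq_decide]
  exact (PySem.List.sorted_perm l (fun c => c) false).nodup_iff

-- The two outer loops agree for every starting accumulator.
theorem pv_outer (t : List String) (acc : Int) :
    t.foldl (fun pocNeopak retazec =>
      let doNotCount :=
        retazec.toList.foldl (fun doNotCount znak =>
          (retazec.toList.foldl (pvStep znak) ((0 : Int), doNotCount)).2) false
      if doNotCount == false then pocNeopak + 1 else pocNeopak) acc
    = t.foldl (fun pocNeopak retazec =>
      let w := PySem.List.sorted retazec.toList (fun c => c) false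
      if (w.zip (PySem.List.slice w (some 1) none)).all (fun p => p.1 != p.2) then
        pocNeopak + 1
      else pocNeopak) acc := by
  simp only [pv_flagA, pv_condB]
  simp

-- ===== VERDICT (by name: the statement is the Claim_ definition above) =====
theorem notRepeating_spec : Claim_equal_notRepeating := by
  intro t _
  unfold Spec_notRepeating notRepeating notRepeating_alt
  exact pv_outer t 0
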